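-- pv_equiv track=rewrite | github.com/manu12121999/ctrl_c_nn | debug.py | inner
-- ===== SOURCE A (Python) =====
-- b = [2,2,2,2,1,2,2,4,2]
--
-- def inner(a):
--     res = []
--     for a_i in a:
--         inter = 0
--         for b_i in b:
--             inter += a_i*b_i
--         res.append(inter)
--     return res
-- ===== SOURCE B (Python) =====
-- b = [2,2,2,2,1,2,2,4,2]
--
-- def inner(a):
--     s = sum(b)
--     return [a_i * s for a_i in a]
-- ===== Notes on version B (the rewrite author's own statement) =====
-- stated objective: faster
-- what changed: Precomputes sum(b) once and maps a_i*sum over a, replacing the inner loop over b for every element.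
import Mathlib
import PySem

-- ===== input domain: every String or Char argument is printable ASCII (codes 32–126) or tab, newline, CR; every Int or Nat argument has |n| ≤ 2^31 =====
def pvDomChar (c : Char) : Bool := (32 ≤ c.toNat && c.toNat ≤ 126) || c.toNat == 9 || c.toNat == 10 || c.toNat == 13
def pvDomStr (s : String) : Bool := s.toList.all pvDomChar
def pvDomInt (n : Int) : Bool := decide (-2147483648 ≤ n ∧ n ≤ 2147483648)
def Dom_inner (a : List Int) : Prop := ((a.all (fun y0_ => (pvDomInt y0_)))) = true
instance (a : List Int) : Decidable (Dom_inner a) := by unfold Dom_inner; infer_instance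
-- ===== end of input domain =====

-- B precomputes sum(b) once and multiplies; asymptotically faster than A's inner loop per element.
-- ===== PORT A =====
def bList : List Int := [2,2,2,2,1,2,2,4,2]

def inner (a : List Int) : List Int :=
  a.foldl (fun res a_i =>
    res ++ [bList.foldl (fun inter b_i => inter + a_i * b_i) 0]) []

-- ===== PORT B =====
def inner_alt (a : List Int) : List Int :=
  let s := bList.foldl (· + ·) 0
  a.map (fun a_i => a_i * s)

-- ===== PRECONDITION & SPEC =====
def Spec_inner (a : List Int) (out : List Int) : Prop := out = inner_alt a
instance (a : List Int) (out : List Int) : Decidable (Spec_inner a out) := by unfold Spec_inner; infer_instance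

-- ===== CLAIM (what is proved, stated in full; the proofs are below) =====
def Claim_equal_inner : Prop := ∀ (a : List Int), Dom_inner a → Spec_inner a (inner a)

-- ===== LEMMAS AND PROOFS =====

-- ===== VERDICT (by name: the statement is the Claim_ definition above) =====
lemma inner_cell (a_i : Int) :
    bList.foldl (fun inter b_i => inter + a_i * b_i) 0 = a_i * 19 := by
  simp [bList, List.foldl]; ring

lemma inner_fold (a : List Int) (acc : List Int) :
    a.foldl (fun res a_i =>
      res ++ [bList.foldl (fun inter b_i => inter + a_i * b_i) 0]) acc
      = acc ++ a.map (fun a_i => a_i * 19) := by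
  induction a generalizing acc with
  | nil => simp
  | cons x xs ih =>
    rw [List.foldl_cons, ih, inner_cell]
    simp

theorem inner_spec : Claim_equal_inner := by
  intro a _
  unfold Spec_inner inner_alt _root_.inner
  rw [inner_fold, List.nil_append]
  norm_num [bList]
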